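-- pv_equiv track=rewrite | github.com/green-fox-academy/IBS_Marcell_Zoltan_Toth | week-03/day-02/minesweeper.py | generate_front_field_size
-- ===== SOURCE A (Python) =====
-- def generate_front_field_size(num, fill):
--     temp = []
--     sol = []
--     for i in range(num):
--         temp.append(fill)
--     for i in range(num):
--         sol.append(temp[:])
--
--     for i in range(1, len(sol) - 1):
--         for j in range(1, len(sol) - 1):
--             sol[i][j] = "X"
--
--     return sol
-- ===== SOURCE B (Python) =====
-- def generate_front_field_size(num, fill):
--     # Row-segment construction: border rows and one interior row template are
--     # built by list repetition/concatenation, then assembled by segments.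
--     if num <= 2:
--         return [[fill] * num for _ in range(num)]
--     border = [fill] * num
--     inner = [fill] + ["X"] * (num - 2) + [fill]
--     return [list(border)] + [list(inner) for _ in range(num - 2)] + [list(border)]
-- ===== Notes on version B (the rewrite author's own statement) =====
-- stated objective: alternative
-- what changed: Replaces the build-then-mutate construction (fill an all-fill num x num grid, then overwrite the interior with nested index loops) by a row-segment assembly: build a border row and one interior row template by list repetition/concatenation and concatenate [border] + (num-2) interior copies + [border].
import Mathlib
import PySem

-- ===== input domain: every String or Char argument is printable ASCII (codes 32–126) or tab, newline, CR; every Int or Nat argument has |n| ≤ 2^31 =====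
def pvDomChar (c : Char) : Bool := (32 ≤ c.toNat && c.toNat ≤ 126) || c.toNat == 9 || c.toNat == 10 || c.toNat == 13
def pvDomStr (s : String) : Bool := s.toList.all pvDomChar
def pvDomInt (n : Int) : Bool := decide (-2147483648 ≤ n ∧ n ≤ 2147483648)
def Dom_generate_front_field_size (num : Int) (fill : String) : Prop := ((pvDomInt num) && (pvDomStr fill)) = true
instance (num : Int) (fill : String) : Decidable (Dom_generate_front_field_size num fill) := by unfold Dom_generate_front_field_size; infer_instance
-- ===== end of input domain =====

-- B replaces A's fill-then-overwrite construction by row-segment assembly: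
-- one border row and one interior row template built by repetition, then
-- [border] ++ (num-2) interior copies ++ [border] (objective: alternative).

-- ===== PORT A =====
-- literal port of A: build temp by appending, build sol by appending copies,
-- then mutate the interior cells with nested index loops.
def generate_front_field_size (num : Int) (fill : String) : List (List String) :=
  let temp : List String := (PySem.List.pyRange 0 num 1).foldl (fun acc _ => acc ++ [fill]) []
  let sol : List (List String) := (PySem.List.pyRange 0 num 1).foldl (fun acc _ => acc ++ [temp]) []
  let sol := (PySem.List.pyRange 1 ((sol.length : Int) - 1) 1).foldl (fun s i =>
    (PySem.List.pyRange 1 ((s.length : Int) - 1) 1).foldl (fun s' j =>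
      s'.set i.toNat ((s'.getD i.toNat []).set j.toNat "X")) s) sol
  sol

-- ===== PORT B =====
-- literal port of B: row repetition / concatenation by segments.
def generate_front_field_size_alt (num : Int) (fill : String) : List (List String) :=
  if num ≤ 2 then
    List.replicate num.toNat (List.replicate num.toNat fill)
  else
    let border : List String := List.replicate num.toNat fill
    let inner : List String := [fill] ++ List.replicate (num - 2).toNat "X" ++ [fill]
    [border] ++ List.replicate (num - 2).toNat inner ++ [border]

-- ===== PRECONDITION & SPEC =====
def Spec_generate_front_field_size (num : Int) (fill : String) (out : List (List String)) : Prop := out = generate_front_field_size_alt num fill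
instance (num : Int) (fill : String) (out : List (List String)) : Decidable (Spec_generate_front_field_size num fill out) := by unfold Spec_generate_front_field_size; infer_instance

-- ===== CLAIM (what is proved, stated in full; the proofs are below) =====
def Claim_equal_generate_front_field_size : Prop := ∀ (num : Int) (fill : String), Dom_generate_front_field_size num fill → Spec_generate_front_field_size num fill (generate_front_field_size num fill)

-- ===== LEMMAS AND PROOFS =====

-- appending one element per range item builds a replicate
lemma foldl_append_replicate {α : Type} (x : α) :
    ∀ (l : List Int) (init : List α),
      l.foldl (fun acc _ => acc ++ [x]) init = init ++ List.replicate l.length x := by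
  intro l
  induction l with
  | nil => simp
  | cons a t ih =>
      intro init
      simp [List.foldl_cons, ih, List.replicate_succ]

-- inner loop: repeatedly setting cell (i, j) equals setting row i once to the folded row
lemma inner_comp (rng : List Int) :
    ∀ (s : List (List String)) (i : Nat),
      rng.foldl (fun s' j => s'.set i ((s'.getD i []).set j.toNat "X")) s
        = s.set i (rng.foldl (fun r j => r.set j.toNat "X") (s.getD i [])) := by
  induction rng with
  | nil =>
      intro s i
      by_cases h : i < s.length
      · simp [List.getD_eq_getElem?_getD, List.getElem?_eq_getElem h, List.set_getElem_self]
      · simp [List.set_eq_of_length_le (by omega : s.length ≤ i)]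
  | cons a t ih =>
      intro s i
      simp only [List.foldl_cons, ih]
      by_cases h : i < s.length
      · simp [List.getD_eq_getElem?_getD, h, List.set_set]
      · simp [List.set_eq_of_length_le (by omega : s.length ≤ i)]

-- elementwise value of a fold of sets over a range
lemma foldl_set_getElem? {α : Type} (x : α) (m : Int) :
    ∀ (a : Int) (r : List α) (k : Nat), 0 ≤ a →
      ((PySem.List.pyRange a m 1).foldl (fun r' j => r'.set j.toNat x) r)[k]? =
        if a ≤ (k : Int) ∧ (k : Int) < m then (r[k]?).map (fun _ => x) else r[k]? := by
  intro a
  induction h : (m - a).toNat generalizing a with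
  | zero =>
      intro r k ha
      rw [PySem.List.pyRange_one_eq_nil (by omega)]
      simp only [List.foldl_nil]
      rw [if_neg (by omega)]
  | succ n ih =>
      intro r k ha
      rw [PySem.List.pyRange_one_cons (by omega)]
      simp only [List.foldl_cons]
      rw [ih (a + 1) (by omega) _ _ (by omega)]
      by_cases hk : (k : Int) = a
      · have hka : k = a.toNat := by omega
        by_cases hlen : k < r.length
        · rw [if_neg (by omega), if_pos (by omega)]
          subst hka
          simp [hlen]
        · rw [if_neg (by omega), if_pos (by omega)]
          subst hka
          simp [hlen]
      · have : (r.set a.toNat x)[k]? = r[k]? := by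
          rw [List.getElem?_set]
          rw [if_neg (by omega)]
        rw [this]
        by_cases hc : a + 1 ≤ (k : Int) ∧ (k : Int) < m
        · rw [if_pos hc, if_pos (by omega)]
        · rw [if_neg hc, if_neg (by omega)]

-- outer loop: elementwise value, carrying the length invariant
lemma outer_getElem? (n : Nat) :
    ∀ (a : Int), 0 ≤ a → ∀ (s : List (List String)), s.length = n → ∀ (k : Nat),
      ((PySem.List.pyRange a ((n : Int) - 1) 1).foldl (fun s i =>
        (PySem.List.pyRange 1 ((s.length : Int) - 1) 1).foldl (fun s' j =>
          s'.set i.toNat ((s'.getD i.toNat []).set j.toNat "X")) s) s)[k]? =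
      if a ≤ (k : Int) ∧ (k : Int) < (n : Int) - 1 then
        (s[k]?).map (fun r => (PySem.List.pyRange 1 ((n : Int) - 1) 1).foldl
          (fun r j => r.set j.toNat "X") r)
      else s[k]? := by
  intro a
  induction h : ((n : Int) - 1 - a).toNat generalizing a with
  | zero =>
      intro ha s hs k
      rw [PySem.List.pyRange_one_eq_nil (by omega)]
      simp only [List.foldl_nil]
      rw [if_neg (by omega)]
  | succ m ih =>
      intro ha s hs k
      rw [PySem.List.pyRange_one_cons (by omega)]
      simp only [List.foldl_cons]
      rw [inner_comp, hs]
      have hlen' : (s.set a.toNat ((PySem.List.pyRange 1 ((n : Int) - 1) 1).foldl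
          (fun r j => r.set j.toNat "X") (s.getD a.toNat []))).length = n := by
        simp [hs]
      rw [ih (a + 1) (by omega) (by omega) _ hlen' k]
      by_cases hk : (k : Int) = a
      · have hka : k = a.toNat := by omega
        subst hka
        rw [if_neg (by omega), if_pos (by omega)]
        by_cases hl : a.toNat < s.length
        · simp [hl, List.getD_eq_getElem?_getD]
        · simp [hl]
      · have heq : (s.set a.toNat ((PySem.List.pyRange 1 ((n : Int) - 1) 1).foldl
            (fun r j => r.set j.toNat "X") (s.getD a.toNat [])))[k]? = s[k]? := by
          rw [List.getElem?_set, if_neg (by omega)]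
        rw [heq]
        by_cases hc : a + 1 ≤ (k : Int) ∧ (k : Int) < (n : Int) - 1
        · rw [if_pos hc, if_pos (by omega)]
        · rw [if_neg hc, if_neg (by omega)]

-- elementwise value of B's segment row list [b] ++ replicate m i ++ [b]
lemma segment_getElem? {α : Type} (b i : α) (m k : Nat) :
    (([b] ++ List.replicate m i ++ [b]))[k]? =
      if k = 0 ∨ k = m + 1 then some b else if k ≤ m then some i else none := by
  rcases Nat.eq_zero_or_pos k with hk | hk
  · subst hk; simp
  · obtain ⟨k', rfl⟩ : ∃ k', k = k' + 1 := ⟨k - 1, by omega⟩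
    by_cases h1 : k' < m
    · rw [if_neg (by omega), if_pos (by omega)]
      simp [List.getElem?_append, h1, List.getElem?_replicate]
    · by_cases h2 : k' = m
      · subst h2
        rw [if_pos (by omega)]
        simp [List.getElem?_append, List.getElem?_replicate]
      · rw [if_neg (by omega), if_neg (by omega)]
        have : m + 2 ≤ k' + 1 := by omega
        apply List.getElem?_eq_none
        simp; omega

-- ===== VERDICT (by name: the statement is the Claim_ definition above) =====
theorem generate_front_field_size_spec : Claim_equal_generate_front_field_size := by
  intro num fill _
  unfold Spec_generate_front_field_size generate_front_field_size generate_front_field_size_alt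
  by_cases hpos : 0 < num
  · obtain ⟨n, rfl⟩ : ∃ n : Nat, num = (n : Int) := ⟨num.toNat, by omega⟩
    have htemp : (PySem.List.pyRange 0 (n : Int) 1).foldl (fun acc _ => acc ++ [fill]) [] =
        List.replicate n fill := by
      rw [foldl_append_replicate, PySem.List.length_pyRange_one]
      norm_num
    have hsol : (PySem.List.pyRange 0 (n : Int) 1).foldl
        (fun acc _ => acc ++ [List.replicate n fill]) [] =
        List.replicate n (List.replicate n fill) := by
      rw [foldl_append_replicate, PySem.List.length_pyRange_one]
      norm_num
    simp only [htemp, hsol, List.length_replicate]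
    by_cases hsmall : (n : Int) ≤ 2
    · rw [if_pos hsmall]
      have hn : Int.toNat (n : Int) = n := by omega
      rw [hn]
      apply List.ext_getElem?
      intro k
      rw [outer_getElem? n 1 (by omega) _ (by simp) k]
      rw [if_neg (by omega)]
    · rw [if_neg hsmall]
      have hn : Int.toNat (n : Int) = n := by omega
      have hm : Int.toNat ((n : Int) - 2) = n - 2 := by omega
      rw [hn, hm]
      apply List.ext_getElem?
      intro k
      rw [outer_getElem? n 1 (by omega) _ (by simp) k]
      rw [segment_getElem?]
      by_cases hint : 1 ≤ (k : Int) ∧ (k : Int) < (n : Int) - 1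
      · rw [if_pos hint, if_neg (by omega), if_pos (by omega)]
        rw [List.getElem?_replicate, if_pos (by omega)]
        simp only [Option.map_some, Option.some.injEq]
        apply List.ext_getElem?
        intro j
        rw [foldl_set_getElem? _ _ 1 _ j (by omega)]
        rw [segment_getElem?]
        by_cases hj : 1 ≤ (j : Int) ∧ (j : Int) < (n : Int) - 1
        · rw [if_pos hj, if_neg (by omega), if_pos (by omega)]
          rw [List.getElem?_replicate, if_pos (by omega)]
          simp
        · rw [if_neg hj, List.getElem?_replicate]
          by_cases hj0 : j = 0
          · subst hj0; simp [if_pos (by omega : 0 < n)]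
          · by_cases hjl : j = n - 1
            · subst hjl
              rw [if_pos (by omega), if_pos (by omega)]
            · rw [if_neg (by omega), if_neg (by omega), if_neg (by omega)]
      · rw [if_neg (by omega), List.getElem?_replicate]
        by_cases hk0 : k = 0
        · subst hk0; simp [if_pos (by omega : 0 < n)]
        · by_cases hkl : k = n - 1
          · subst hkl
            rw [if_pos (by omega), if_pos (by omega)]
          · rw [if_neg (by omega), if_neg (by omega), if_neg (by omega)]
  · have hnil : PySem.List.pyRange 0 num 1 = [] :=
      PySem.List.pyRange_one_eq_nil (by omega)
    have hz : num.toNat = 0 := by omega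
    simp [hnil, hz, if_pos (by omega : num ≤ 2)]
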